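-- pv_equiv track=rewrite | github.com/boxu0001/practice | py3/S1653_minDeletion.py | minimumDeletions2
-- ===== SOURCE A (Python) =====
-- import collections
--
-- def minimumDeletions2(s: str) -> int:
--     cnts = collections.Counter(s)
--     rema = cnts['a']
--     remb = cnts['b']
--     N=rema+remb
--
--     maxCnt = 0
--     cura, curb = 0, 0
--     for c in s:
--         if c == 'b':        # (cura, curb) -- b -> (cura,curb+1), states changed
--             curb+=1
--             remb-=1
--         else:
--             maxCnt = max(maxCnt, cura + curb + remb)    #delete all remaining 'a', get one possible result, (cura, curb) -----> (cura, curb+remb) this is one final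
--             cura+=1     #or add the 'a' and removing leading 'b's,   (cura, curb) -- a -> (cura+1, 0)
--             rema-=1
--             curb=0
--
--     maxCnt = max(maxCnt, cura+curb)
--     return maxCnt
-- ===== SOURCE B (Python) =====
-- def minimumDeletions2(s: str) -> int:
--     res = 0  # min deletions so far to make the prefix of form a*b* (non-'b' counted as 'a')
--     b = 0    # number of 'b' seen so far
--     for c in s:
--         if c == 'b':
--             b += 1
--         else:
--             res = min(res + 1, b)
--     return len(s) - res
-- ===== Notes on version B (the rewrite author's own statement) =====
-- stated objective: simpler
-- what changed: Replaces A's Counter pre-pass plus max-kept tracking over four counters (maxCnt/cura/curb/remb) with the standard single-pass running-minimum-deletions DP (res=min(res+1,b)) and returns len(s)-res.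
import Mathlib
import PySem

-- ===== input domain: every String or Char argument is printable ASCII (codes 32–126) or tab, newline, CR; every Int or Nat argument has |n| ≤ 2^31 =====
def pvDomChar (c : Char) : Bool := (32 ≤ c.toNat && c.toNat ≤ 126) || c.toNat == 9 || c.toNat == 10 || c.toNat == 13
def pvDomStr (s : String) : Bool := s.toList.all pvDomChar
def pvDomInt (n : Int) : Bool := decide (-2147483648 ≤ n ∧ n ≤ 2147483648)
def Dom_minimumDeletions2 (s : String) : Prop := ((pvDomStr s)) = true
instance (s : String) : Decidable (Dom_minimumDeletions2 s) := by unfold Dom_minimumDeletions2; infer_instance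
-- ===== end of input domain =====

-- B replaces A's max-kept tracking (cura/curb/rema/remb plus a global Counter pre-pass) by the
-- standard single-pass running-minimum-deletions DP and returns len(s) - res; objective: simpler.

-- ===== PORT A =====
-- state = (maxCnt, cura, curb, rema, remb), exactly A's loop body
def stepA (st : Int × Int × Int × Int × Int) (c : Char) : Int × Int × Int × Int × Int :=
  match st with
  | (maxCnt, cura, curb, rema, remb) =>
    if c = 'b' then (maxCnt, cura, curb + 1, rema, remb - 1)
    else (max maxCnt (cura + curb + remb), cura + 1, 0, rema - 1, remb)

def minimumDeletions2 (s : String) : Int :=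
  let cnts := PySem.Dict.counter s.toList
  let rema := cnts.getD 'a' 0
  let remb := cnts.getD 'b' 0
  let _N := rema + remb
  let st := s.toList.foldl stepA (0, 0, 0, rema, remb)
  max st.1 (st.2.1 + st.2.2.1)

-- ===== PORT B =====
-- state = (res, b): res = min deletions so far, b = number of 'b' seen so far
def stepB (st : Int × Int) (c : Char) : Int × Int :=
  if c = 'b' then (st.1, st.2 + 1) else (min (st.1 + 1) st.2, st.2)

def minimumDeletions2_alt (s : String) : Int :=
  let st := s.toList.foldl stepB (0, 0)
  PySem.Str.len s - st.1

-- ===== PRECONDITION & SPEC =====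
def Spec_minimumDeletions2 (s : String) (out : Int) : Prop := out = minimumDeletions2_alt s
instance (s : String) (out : Int) : Decidable (Spec_minimumDeletions2 s out) := by unfold Spec_minimumDeletions2; infer_instance

-- ===== CLAIM (what is proved, stated in full; the proofs are below) =====
def Claim_equal_minimumDeletions2 : Prop := ∀ (s : String), Dom_minimumDeletions2 s → Spec_minimumDeletions2 s (minimumDeletions2 s)

-- ===== LEMMAS AND PROOFS =====

-- number of 'b' in a list
def cntB : List Char → Int
  | [] => 0
  | c :: t => (if c = 'b' then 1 else 0) + cntB t

-- number of non-'b' in a list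
def cntA : List Char → Int
  | [] => 0
  | c :: t => (if c = 'b' then 0 else 1) + cntA t

-- fK t = longest kept subsequence of shape (non-b)* b*
def fK : List Char → Int
  | [] => 0
  | c :: t => if c = 'b' then max (fK t) (1 + cntB t) else 1 + fK t

-- eD: companion of cntA so that B's fold computes min (res + cntA t) (b + eD t)
def eD : List Char → Int
  | [] => 0
  | c :: t => if c = 'b' then 1 + eD t else min (cntA t) (eD t)

lemma cntB_nonneg : ∀ t, 0 ≤ cntB t := by
  intro t; induction t with
  | nil => simp [cntB]
  | cons c t ih => simp only [cntB]; split <;> omega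

lemma cntB_add_cntA : ∀ t, cntB t + cntA t = (t.length : Int) := by
  intro t; induction t with
  | nil => simp [cntB, cntA]
  | cons c t ih => simp only [cntB, cntA, List.length_cons]; split <;> push_cast <;> omega

lemma cntB_le_fK : ∀ t, cntB t ≤ fK t := by
  intro t; induction t with
  | nil => simp [cntB, fK]
  | cons c t ih => simp only [cntB, fK]; split <;> omega

lemma cntB_eq_count : ∀ t, cntB t = (t.count 'b' : Int) := by
  intro t; induction t with
  | nil => simp [cntB]
  | cons c t ih =>
    simp only [cntB, List.count_cons, beq_iff_eq]
    split <;> simp_all <;> omega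

lemma foldA_eq : ∀ (t : List Char) (m ca cb ra : Int), 0 ≤ cb →
    (let st := t.foldl stepA (m, ca, cb, ra, cntB t)
     max st.1 (st.2.1 + st.2.2.1)) = max m (ca + max (cb + cntB t) (fK t)) := by
  intro t
  induction t with
  | nil => intro m ca cb ra hcb; simp [List.foldl, cntB, fK]; omega
  | cons c t ih =>
    intro m ca cb ra hcb
    by_cases hc : c = 'b'
    · have h1 : cntB (c :: t) = 1 + cntB t := by simp [cntB, hc]
      have h2 : cntB (c :: t) - 1 = cntB t := by omega
      simp only [List.foldl, stepA, if_pos hc, h1]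
      have := ih m ca (cb + 1) ra (by omega)
      rw [show 1 + cntB t - 1 = cntB t by omega]
      simp only at this ⊢
      rw [this]
      have hf : fK (c :: t) = max (fK t) (1 + cntB t) := by simp [fK, hc]
      rw [hf]; omega
    · have h1 : cntB (c :: t) = cntB t := by simp [cntB, hc]
      simp only [List.foldl, stepA, if_neg hc, h1]
      have := ih (max m (ca + cb + cntB t)) (ca + 1) 0 (ra - 1) (by omega)
      simp only at this ⊢
      rw [this]
      have hf : fK (c :: t) = 1 + fK t := by simp [fK, hc]
      have hcf := cntB_le_fK t
      rw [hf]; omega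

lemma foldB_eq : ∀ (t : List Char) (res b : Int), res ≤ b →
    (t.foldl stepB (res, b)).1 = min (res + cntA t) (b + eD t) := by
  intro t
  induction t with
  | nil => intro res b h; simp [List.foldl, cntA, eD]; omega
  | cons c t ih =>
    intro res b h
    by_cases hc : c = 'b'
    · simp only [List.foldl, stepB, if_pos hc]
      rw [ih res (b + 1) (by omega)]
      simp [cntA, eD, hc]; omega
    · simp only [List.foldl, stepB, if_neg hc]
      rw [ih (min (res + 1) b) b (by omega)]
      simp [cntA, eD, hc]; omega

lemma fK_eq_len_sub : ∀ t, fK t + min (cntA t) (eD t) = (t.length : Int) := by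
  intro t; induction t with
  | nil => simp [fK, cntA, eD]
  | cons c t ih =>
    have hlen := cntB_add_cntA t
    by_cases hc : c = 'b'
    · simp only [fK, cntA, eD, if_pos hc, List.length_cons]
      push_cast; omega
    · simp only [fK, cntA, eD, if_neg hc, List.length_cons]
      push_cast; omega

-- ===== VERDICT (by name: the statement is the Claim_ definition above) =====
theorem minimumDeletions2_spec : Claim_equal_minimumDeletions2 := by
  intro s _
  unfold Spec_minimumDeletions2 minimumDeletions2 minimumDeletions2_alt
  have hremb : (PySem.Dict.counter s.toList).getD 'b' 0 = cntB s.toList := by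
    rw [PySem.Dict.getD_counter, cntB_eq_count]
  simp only [hremb]
  have hA := foldA_eq s.toList 0 0 0 ((PySem.Dict.counter s.toList).getD 'a' 0) le_rfl
  simp only at hA
  rw [hA]
  have hB := foldB_eq s.toList 0 0 le_rfl
  rw [hB]
  have h1 := cntB_nonneg s.toList
  have h2 := cntB_le_fK s.toList
  have h3 := fK_eq_len_sub s.toList
  rw [PySem.Str.len_eq]
  omega
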